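-- pv_equiv track=rewrite | github.com/miroaleksej/IsogenyGuard-SDK | isogenyguard/visualization.py | heatmap_counts
-- ===== SOURCE A (Python) =====
-- from typing import Iterable, List, Tuple
--
-- def _clamp(value: int, low: int, high: int) -> int:
--     return max(low, min(high, value))
--
-- def quantize_linear_value(value: int, max_range: int, bins: int = 100) -> int:
--     """
--     Maps a scalar in [0, max_range] to a 1-based bin index in [1, bins].
--
--     Uses integer arithmetic to avoid floating-point precision loss.
--     """
--     if bins <= 0:
--         raise ValueError("bins must be positive")
--     if max_range <= 0:
--         raise ValueError("max_range must be positive")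
--
--     # Allow values outside range but clamp at the end.
--     if value < 0:
--         return 1
--
--     bin_index = (value * bins) // max_range + 1
--     return _clamp(bin_index, 1, bins)
--
-- def quantize_uruz(
--     uruz: Iterable[Tuple[int, int]],
--     max_range: int,
--     bins: int = 100,
-- ) -> List[Tuple[int, int]]:
--     """
--     Quantizes (u_r, u_z) pairs into 1-based bin coordinates.
--     """
--     return [
--         (
--             quantize_linear_value(ur, max_range, bins),
--             quantize_linear_value(uz, max_range, bins),
--         )
--         for ur, uz in uruz
--     ]
--
-- def heatmap_counts(
--     uruz: Iterable[Tuple[int, int]],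
--     max_range: int,
--     bins: int = 100,
-- ) -> List[List[int]]:
--     """
--     Builds a bins x bins heatmap of counts from quantized (u_r, u_z) pairs.
--     """
--     grid = [[0 for _ in range(bins)] for _ in range(bins)]
--     for bx, by in quantize_uruz(uruz, max_range, bins):
--         grid[by - 1][bx - 1] += 1
--     return grid
-- ===== SOURCE B (Python) =====
-- from typing import Iterable, List, Tuple
--
-- def _clamp(value: int, low: int, high: int) -> int:
--     return max(low, min(high, value))
--
-- def quantize_linear_value(value: int, max_range: int, bins: int = 100) -> int:
--     if bins <= 0:
--         raise ValueError("bins must be positive")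
--     if max_range <= 0:
--         raise ValueError("max_range must be positive")
--     if value < 0:
--         return 1
--     bin_index = (value * bins) // max_range + 1
--     return _clamp(bin_index, 1, bins)
--
-- def quantize_uruz(
--     uruz: Iterable[Tuple[int, int]],
--     max_range: int,
--     bins: int = 100,
-- ) -> List[Tuple[int, int]]:
--     return [
--         (
--             quantize_linear_value(ur, max_range, bins),
--             quantize_linear_value(uz, max_range, bins),
--         )
--         for ur, uz in uruz
--     ]
--
-- def heatmap_counts(
--     uruz: Iterable[Tuple[int, int]],
--     max_range: int,
--     bins: int = 100,
-- ) -> List[List[int]]: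
--     """Gather formulation: no mutable grid and no accumulator at all.
--     Each cell computes its own value by counting how many quantized pairs
--     fall on it (scatter -> gather inversion of A)."""
--     qs = quantize_uruz(uruz, max_range, bins)
--     return [[qs.count((bx + 1, by + 1)) for bx in range(bins)]
--             for by in range(bins)]
-- ===== Notes on version B (the rewrite author's own statement) =====
-- stated objective: alternative
-- what changed: B inverts A's scatter into a gather: instead of allocating a grid and incrementing cells while streaming over the pairs, B loops over the cells and each cell counts its own occurrences in the quantized list; it trades A's O(bins^2+n) for O(bins^2*n) in exchange for a pure, accumulator-free formulation.
import Mathlib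
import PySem

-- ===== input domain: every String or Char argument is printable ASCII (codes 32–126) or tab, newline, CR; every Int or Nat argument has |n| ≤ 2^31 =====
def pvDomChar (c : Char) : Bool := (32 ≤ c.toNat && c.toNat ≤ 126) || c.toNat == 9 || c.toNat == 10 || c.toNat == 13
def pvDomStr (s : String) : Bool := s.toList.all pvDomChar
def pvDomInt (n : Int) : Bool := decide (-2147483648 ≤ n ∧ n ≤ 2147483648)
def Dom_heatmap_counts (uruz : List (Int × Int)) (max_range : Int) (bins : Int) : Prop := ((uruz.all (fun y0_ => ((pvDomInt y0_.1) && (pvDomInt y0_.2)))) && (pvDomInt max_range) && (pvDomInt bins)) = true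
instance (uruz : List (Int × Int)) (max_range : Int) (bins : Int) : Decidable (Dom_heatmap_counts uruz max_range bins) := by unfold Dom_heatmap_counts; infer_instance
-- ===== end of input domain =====

-- B inverts A's scatter into a gather: each cell counts its own occurrences in the
-- quantized list, with no mutable grid and no accumulator (objective: alternative).

-- ===== PORT A =====
-- helper _clamp
def pvClamp (value low high : Int) : Int := max low (min high value)

-- quantize_linear_value; the 'raise ValueError' branches (bins ≤ 0 / max_range ≤ 0) are
-- excluded by Pre_heatmap_counts whenever this helper is reached, so only the returning path is ported.
def quantize_linear_value (value max_range bins : Int) : Int :=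
  if value < 0 then 1
  else pvClamp (PySem.Int.floordiv (value * bins) max_range + 1) 1 bins

def quantize_uruz (uruz : List (Int × Int)) (max_range : Int) (bins : Int) : List (Int × Int) :=
  uruz.map (fun p => (quantize_linear_value p.1 max_range bins, quantize_linear_value p.2 max_range bins))

def heatmap_counts (uruz : List (Int × Int)) (max_range : Int) (bins : Int) : List (List Int) :=
  let grid := (List.range bins.toNat).map (fun _ => (List.range bins.toNat).map (fun _ => (0 : Int)))
  (quantize_uruz uruz max_range bins).foldl
    (fun g p => g.modify (p.2 - 1).toNat (fun row => row.modify (p.1 - 1).toNat (· + 1))) grid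

-- ===== PORT B =====
def heatmap_counts_alt (uruz : List (Int × Int)) (max_range : Int) (bins : Int) : List (List Int) :=
  let qs := quantize_uruz uruz max_range bins
  (List.range bins.toNat).map (fun (byi : Nat) =>
    (List.range bins.toNat).map (fun (bxi : Nat) =>
      (PySem.List.count qs ((bxi : Int) + 1, (byi : Int) + 1) : Int)))

-- ===== PRECONDITION & SPEC =====
-- Pre_ excludes exactly the inputs on which A raises ValueError: a nonempty uruz with
-- bins ≤ 0 or max_range ≤ 0 (with empty uruz the quantizer is never called and A returns).
def Pre_heatmap_counts (uruz : List (Int × Int)) (max_range : Int) (bins : Int) : Prop :=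
  uruz = [] ∨ (0 < bins ∧ 0 < max_range)
instance (uruz : List (Int × Int)) (max_range : Int) (bins : Int) : Decidable (Pre_heatmap_counts uruz max_range bins) := by unfold Pre_heatmap_counts; infer_instance

def pvWitness_heatmap_counts : (List (Int × Int)) × Int × Int := ([(0, 0), (5, 7), (9, 9), (5, 7)], 10, 3)

def Spec_heatmap_counts (uruz : List (Int × Int)) (max_range : Int) (bins : Int) (out : List (List Int)) : Prop := out = heatmap_counts_alt uruz max_range bins
instance (uruz : List (Int × Int)) (max_range : Int) (bins : Int) (out : List (List Int)) : Decidable (Spec_heatmap_counts uruz max_range bins out) := by unfold Spec_heatmap_counts; infer_instance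

-- ===== CLAIM (what is proved, stated in full; the proofs are below) =====
def Claim_equal_heatmap_counts : Prop := ∀ (uruz : List (Int × Int)) (max_range : Int) (bins : Int), Dom_heatmap_counts uruz max_range bins → Pre_heatmap_counts uruz max_range bins → Spec_heatmap_counts uruz max_range bins (heatmap_counts uruz max_range bins)

-- ===== LEMMAS AND PROOFS =====

-- With at least one bin, the quantizer lands in [1, bins].
theorem quantize_mem (value max_range bins : Int) (hb : 0 < bins) :
    1 ≤ quantize_linear_value value max_range bins ∧ quantize_linear_value value max_range bins ≤ bins := by
  unfold quantize_linear_value pvClamp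
  split_ifs <;> constructor <;> omega

-- abbreviation for A's per-pair grid update (proof-only helper)
def pvStep (g : List (List Int)) (p : Int × Int) : List (List Int) :=
  g.modify (p.2 - 1).toNat (fun row => row.modify (p.1 - 1).toNat (· + 1))

theorem pvStep_length (g : List (List Int)) (p : Int × Int) :
    (pvStep g p).length = g.length := by
  simp [pvStep]

theorem pvStep_row_length (g : List (List Int)) (p : Int × Int) (r : Nat)
    (h1 : r < (pvStep g p).length) (h2 : r < g.length) :
    (pvStep g p)[r].length = g[r].length := by
  unfold pvStep
  rw [List.getElem_modify]
  split_ifs <;> simp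

theorem pvStep_get (g : List (List Int)) (p : Int × Int) (r c : Nat)
    (hp : 1 ≤ p.1 ∧ 1 ≤ p.2)
    (h1 : r < (pvStep g p).length) (h2 : c < (pvStep g p)[r].length)
    (h3 : r < g.length) (h4 : c < g[r].length) :
    (pvStep g p)[r][c] = g[r][c] + (if p = ((c : Int) + 1, (r : Int) + 1) then 1 else 0) := by
  unfold pvStep at h1 h2 ⊢
  by_cases hkey : p = ((c : Int) + 1, (r : Int) + 1)
  · subst hkey
    simp
  · rw [if_neg hkey]
    by_cases hrow_eq : (p.2 - 1).toNat = r
    · have hcol : ¬ (p.1.toNat - 1 = c) := by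
        intro hcc
        exact hkey (Prod.ext (by omega) (by omega))
      have hrow2 : p.2.toNat - 1 = r := by omega
      simp [hrow2, hcol]
    · have hrow2 : ¬ (p.2.toNat - 1 = r) := by omega
      simp [hrow2]

-- A-side fold: lengths are preserved and each entry grows by the count of its (bx, by) key.
theorem foldA_invariant (q : List (Int × Int)) (n : Nat)
    (hq : ∀ p ∈ q, 1 ≤ p.1 ∧ p.1 ≤ (n : Int) ∧ 1 ≤ p.2 ∧ p.2 ≤ (n : Int)) :
    ∀ (g : List (List Int)), g.length = n → (∀ (r : Nat) (hr : r < g.length), g[r].length = n) →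
    (q.foldl pvStep g).length = n ∧
    (∀ (r : Nat) (h1 : r < (q.foldl pvStep g).length), (q.foldl pvStep g)[r].length = n) ∧
    ∀ (r c : Nat) (hr : r < n) (hc : c < n)
      (h1 : r < (q.foldl pvStep g).length) (h2 : c < (q.foldl pvStep g)[r].length)
      (h3 : r < g.length) (h4 : c < g[r].length),
      (q.foldl pvStep g)[r][c] = g[r][c] + (q.count ((c : Int) + 1, (r : Int) + 1)) := by
  induction q with
  | nil =>
    intro g hlen hrow
    exact ⟨hlen, hrow, by intro r c hr hc h1 h2 h3 h4; simp [List.foldl]⟩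
  | cons p q ih =>
    intro g hlen hrow
    have hp := hq p (by simp)
    have hq' : ∀ p' ∈ q, 1 ≤ p'.1 ∧ p'.1 ≤ (n : Int) ∧ 1 ≤ p'.2 ∧ p'.2 ≤ (n : Int) := by
      intro p' hp'; exact hq p' (by simp [hp'])
    have hlen' : (pvStep g p).length = n := by rw [pvStep_length]; exact hlen
    have hrow' : ∀ (r : Nat) (hr : r < (pvStep g p).length), (pvStep g p)[r].length = n := by
      intro r hr
      have hr2 : r < g.length := by rw [pvStep_length] at hr; exact hr
      rw [pvStep_row_length g p r hr hr2]
      exact hrow r hr2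
    obtain ⟨ihlen, ihrow, ihval⟩ := ih hq' (pvStep g p) hlen' hrow'
    rw [List.foldl_cons]
    refine ⟨ihlen, ihrow, ?_⟩
    intro r c hr hc h1 h2 h3 h4
    have h3' : r < (pvStep g p).length := by omega
    have h4' : c < (pvStep g p)[r].length := by rw [hrow' r h3']; exact hc
    rw [ihval r c hr hc h1 h2 h3' h4']
    rw [pvStep_get g p r c ⟨hp.1, hp.2.2.1⟩ h3' h4' h3 h4]
    rw [List.count_cons]
    by_cases h : p = ((c : Int) + 1, (r : Int) + 1)
    · rw [if_pos h, h]
      simp only [beq_self_eq_true, if_pos]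
      push_cast; ring
    · rw [if_neg h]
      have hb : ¬ (p == ((c : Int) + 1, (r : Int) + 1)) = true := by
        simp only [beq_iff_eq]; exact h
      rw [if_neg hb]
      push_cast; ring

theorem heatmap_counts_spec : Claim_equal_heatmap_counts := by
  intro uruz max_range bins _ hpre
  unfold Spec_heatmap_counts heatmap_counts heatmap_counts_alt
  rw [show (∀ (l : List (Int × Int)) (g : List (List Int)), l.foldl (fun g p => g.modify (p.2 - 1).toNat (fun row => row.modify (p.1 - 1).toNat (· + 1))) g = l.foldl pvStep g) from fun _ _ => rfl]
  have hq : ∀ p ∈ quantize_uruz uruz max_range bins,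
      1 ≤ p.1 ∧ p.1 ≤ (bins.toNat : Int) ∧ 1 ≤ p.2 ∧ p.2 ≤ (bins.toNat : Int) := by
    rcases hpre with h | ⟨hb, _⟩
    · intro p hp; rw [h] at hp; simp [quantize_uruz] at hp
    · intro p hp
      simp only [quantize_uruz, List.mem_map] at hp
      obtain ⟨a, _, rfl⟩ := hp
      have h1 := quantize_mem a.1 max_range bins hb
      have h2 := quantize_mem a.2 max_range bins hb
      have hbn : (bins.toNat : Int) = bins := by omega
      exact ⟨h1.1, by omega, h2.1, by omega⟩
  have hglen : ((List.range bins.toNat).map (fun _ => (List.range bins.toNat).map (fun _ => (0 : Int)))).length = bins.toNat := by simp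
  have hgrow : ∀ (r : Nat) (hr : r < ((List.range bins.toNat).map (fun _ => (List.range bins.toNat).map (fun _ => (0 : Int)))).length),
      ((List.range bins.toNat).map (fun _ => (List.range bins.toNat).map (fun _ => (0 : Int))))[r].length = bins.toNat := by
    intro r hr; simp
  obtain ⟨hflen, hfrow, hfval⟩ := foldA_invariant (quantize_uruz uruz max_range bins) bins.toNat hq _ hglen hgrow
  apply List.ext_getElem
  · rw [hflen]; simp
  intro r h1 h2
  apply List.ext_getElem
  · rw [hfrow r h1]; simp
  intro c h1' h2'
  have hr : r < bins.toNat := by omega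
  have hc : c < bins.toNat := by rw [hfrow r h1] at h1'; exact h1'
  have h3 : r < ((List.range bins.toNat).map (fun _ => (List.range bins.toNat).map (fun _ => (0 : Int)))).length := by omega
  have h4 : c < ((List.range bins.toNat).map (fun _ => (List.range bins.toNat).map (fun _ => (0 : Int))))[r].length := by
    rw [hgrow r h3]; exact hc
  rw [hfval r c hr hc h1 h1' h3 h4]
  simp [PySem.List.count_eq]
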